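-- pv_equiv track=rewrite | github.com/sandy836/Dyanamic-Programming-Patterns | classical_problem/longest_balanced_string.py | LBSlength
-- ===== SOURCE A (Python) =====
-- def LBSlength(s):
--     open_bracket = ['(', '{', '[']
--     close_bracket = [')', '}', ']']
--     s = "*"+s
--     dp = [0]*len(s)
--     _max_len = 0
--     for i in range(1, len(s)):
--         if s[i] in close_bracket and s[i-1] == open_bracket[close_bracket.index(s[i])]:
--             dp[i] = dp[i-1]+ 2 + dp[i-2]
--         elif s[i] in close_bracket and s[i-1] not in open_bracket and \
--             s[i-dp[i-1]-1] == open_bracket[close_bracket.index(s[i])]: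
--             dp[i] = dp[i-1]+ 2 + dp[i-dp[i-1]-2]
--         _max_len = max(_max_len, dp[i])
--     return _max_len
-- ===== SOURCE B (Python) =====
-- def LBSlength(s):
--     # Index-stack algorithm: keep a stack of unmatched/barrier indices (bottom sentinel -1);
--     # on a matching close, pop and measure the run against the new top.
--     pairs = {')': '(', '}': '{', ']': '['}
--     stack = [-1]
--     max_len = 0
--     for i, c in enumerate(s):
--         if c in '({[':
--             stack.append(i)
--         else:
--             top = stack[-1]
--             if top != -1 and c in pairs and s[top] == pairs[c]:
--                 stack.pop()
--                 max_len = max(max_len, i - stack[-1])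
--             else:
--                 stack.append(i)
--     return max_len
-- ===== Notes on version B (the rewrite author's own statement) =====
-- stated objective: idiomatic
-- what changed: Replaces the dp-array dynamic program (per-index longest-balanced-suffix lengths with index arithmetic over a '*'-sentinel-prefixed string) by the canonical index-stack algorithm: a stack of unmatched/barrier indices over a sentinel -1, popping on a matching close and measuring i - stack[-1].
import Mathlib
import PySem

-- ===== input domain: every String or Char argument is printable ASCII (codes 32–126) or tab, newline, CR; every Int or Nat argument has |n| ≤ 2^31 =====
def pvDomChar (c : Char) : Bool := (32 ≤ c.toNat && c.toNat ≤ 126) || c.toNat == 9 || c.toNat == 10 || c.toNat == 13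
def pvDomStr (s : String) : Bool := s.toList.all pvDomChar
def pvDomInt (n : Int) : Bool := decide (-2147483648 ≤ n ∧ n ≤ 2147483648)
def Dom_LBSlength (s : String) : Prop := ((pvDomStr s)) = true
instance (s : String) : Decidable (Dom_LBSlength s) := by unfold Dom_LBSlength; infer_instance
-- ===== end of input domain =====

-- B replaces the per-index dp-array DP with the canonical index-stack algorithm (a stack of
-- unmatched/barrier indices over a sentinel -1), a different single-pass data structure; objective: idiomatic.

-- ===== PORT A =====
-- loop body of A's `for i in range(1, len(s))` (state = (dp, _max_len)); all pyGetD defaults are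
-- unreachable: every index evaluated on a taken branch is in range (Python raises nowhere here)
def stepA (cs : List Char) (st : List Int × Int) (i : Int) : List Int × Int :=
  let open_bracket : List Char := ['(', '{', '[']
  let close_bracket : List Char := [')', '}', ']']
  let dp := st.1
  let mx := st.2
  let si := PySem.List.pyGetD cs i '*'                        -- s[i]
  let dp' :=
    if close_bracket.contains si ∧
       PySem.List.pyGetD cs (i - 1) '*' =
         PySem.List.pyGetD open_bracket (((PySem.List.index? close_bracket si).getD 0 : Nat) : Int) '*' then
      PySem.List.pySetD dp i
        (PySem.List.pyGetD dp (i - 1) 0 + 2 + PySem.List.pyGetD dp (i - 2) 0)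
    else if close_bracket.contains si ∧
       ¬ open_bracket.contains (PySem.List.pyGetD cs (i - 1) '*') ∧
       PySem.List.pyGetD cs (i - PySem.List.pyGetD dp (i - 1) 0 - 1) '*' =
         PySem.List.pyGetD open_bracket (((PySem.List.index? close_bracket si).getD 0 : Nat) : Int) '*' then
      PySem.List.pySetD dp i
        (PySem.List.pyGetD dp (i - 1) 0 + 2 +
         PySem.List.pyGetD dp (i - PySem.List.pyGetD dp (i - 1) 0 - 2) 0)
    else dp
  (dp', max mx (PySem.List.pyGetD dp' i 0))

def LBSlength (s : String) : Int :=
  let cs : List Char := '*' :: s.toList                       -- s = "*" + s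
  ((PySem.List.pyRange 1 (PySem.List.len cs) 1).foldl (stepA cs)
    (List.replicate cs.length 0, 0)).2                        -- dp = [0]*len(s); _max_len = 0

-- ===== PORT B =====
-- loop body of B's `for i, c in enumerate(s)` (state = (stack, max_len); stack head = Python stack[-1]);
-- the headD defaults are unreachable: the stack always keeps its bottom sentinel -1
def stepB (ts : List Char) (st : List Int × Int) (ic : Int × Char) : List Int × Int :=
  let stack := st.1
  let mx := st.2
  if ['(', '{', '['].contains ic.2 then                       -- c in '({['
    (ic.1 :: stack, mx)
  else
    let top := stack.headD (-1)                               -- stack[-1]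
    -- top != -1 and c in pairs and s[top] == pairs[c]
    if top ≠ -1 ∧
       PySem.Dict.get? (PySem.Dict.ofList [(')', '('), ('}', '{'), (']', '[')]) ic.2 =
         some (PySem.List.pyGetD ts top '*') then
      let stack' := stack.tail                                -- stack.pop()
      (stack', max mx (ic.1 - stack'.headD (-1)))             -- i - stack[-1]
    else
      (ic.1 :: stack, mx)

def LBSlength_alt (s : String) : Int :=
  ((PySem.List.enumerate s.toList 0).foldl (stepB s.toList) ([-1], 0)).2

-- ===== PRECONDITION & SPEC =====
def Spec_LBSlength (s : String) (out : Int) : Prop := out = LBSlength_alt s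
instance (s : String) (out : Int) : Decidable (Spec_LBSlength s out) := by unfold Spec_LBSlength; infer_instance

-- ===== CLAIM (what is proved, stated in full; the proofs are below) =====
def Claim_equal_LBSlength : Prop := ∀ (s : String), Dom_LBSlength s → Spec_LBSlength s (LBSlength s)

-- ===== LEMMAS AND PROOFS =====

set_option maxRecDepth 10000

-- the matching opening bracket of a closing bracket, if any
def matchO (c : Char) : Option Char :=
  if c = ')' then some '(' else if c = '}' then some '{' else if c = ']' then some '[' else none

-- length of the longest balanced substring of t ending at index i (the common specification)
def dfun (t : List Char) : Nat → Nat
  | 0 => 0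
  | (j+1) =>
    let prev := dfun t j
    match matchO (t.getD (j+1) '*') with
    | none => 0
    | some o =>
      if prev ≤ j ∧ t.getD (j - prev) '*' = o then
        prev + 2 + (if prev < j then dfun t (j - prev - 1) else 0)
      else 0
termination_by i => i
decreasing_by all_goals omega

def dInt (t : List Char) (i : Int) : Int := if i < 0 then 0 else (dfun t i.toNat : Int)

-- running maximum of dfun over the first k indices
def amax (t : List Char) (k : Nat) : Int :=
  (List.range k).foldl (fun m i => max m ((dfun t i : Int))) 0

-- A's dp array after the loop has processed i = 1 .. k
def dpvec (t : List Char) (k : Nat) : List Int :=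
  (List.range (t.length + 1)).map (fun j => if 1 ≤ j ∧ j ≤ k then ((dfun t (j-1) : Int)) else 0)

-- B's stack invariant: strictly decreasing down to the sentinel -1, and between consecutive
-- entries a, b the segment strictly between b and a is the longest balanced run ending before a
def ChainOK (t : List Char) : List Int → Prop
  | [] => False
  | [a] => a = -1
  | a :: b :: rest => b < a ∧ 0 ≤ a ∧ dInt t (a - 1) = a - 1 - b ∧ ChainOK t (b :: rest)

theorem get?_pairs (c : Char) :
    PySem.Dict.get? (PySem.Dict.ofList [(')', '('), ('}', '{'), (']', '[')]) c = matchO c := by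
  have h : PySem.Dict.ofList [(')', '('), ('}', '{'), (']', '[')] =
      PySem.Dict.mk [(')', '('), ('}', '{'), (']', '[')] := by decide
  rw [h]
  simp only [PySem.Dict.get?_mk_cons, matchO, beq_iff_eq]
  by_cases h1 : c = ')' <;> by_cases h2 : c = '}' <;> by_cases h3 : c = ']' <;>
    simp_all [eq_comm, PySem.Dict.get?]

theorem contains_open_matchO (c : Char) (h : (['(', '{', '['].contains c) = true) :
    matchO c = none := by
  by_cases h1 : c = '(' <;> by_cases h2 : c = '{' <;> by_cases h3 : c = '[' <;>
    simp_all [matchO]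

theorem matchO_cases (c o : Char) (h : matchO c = some o) :
    (c = ')' ∧ o = '(') ∨ (c = '}' ∧ o = '{') ∨ (c = ']' ∧ o = '[') := by
  unfold matchO at h
  split_ifs at h with h1 h2 h3 <;> simp_all
  · exact h.symm
  · exact h.symm
  · exact h.symm

-- the open bracket A looks up via close_bracket.index is exactly matchO
theorem star_ne (c o : Char) (h : matchO c = some o) : ('*' : Char) ≠ o := by
  rcases matchO_cases c o h with ⟨rfl, rfl⟩ | ⟨rfl, rfl⟩ | ⟨rfl, rfl⟩ <;> decide

theorem dfun_zero_of_matchO_none (t : List Char) (i : Nat)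
    (h : matchO (t.getD i '*') = none) : dfun t i = 0 := by
  cases i with
  | zero => simp [dfun]
  | succ j => rw [dfun]; simp only [h]

theorem dfun_le (t : List Char) : ∀ i, dfun t i ≤ i + 1 := by
  intro i
  induction i using Nat.strong_induction_on with
  | _ i ih =>
    cases i with
    | zero => simp [dfun]
    | succ j =>
      cases hm : matchO (t.getD (j+1) '*') with
      | none => rw [dfun]; simp only [hm]; omega
      | some o =>
        rw [dfun]; simp only [hm]
        split_ifs with h1 h2
        · have := ih (j - dfun t j - 1) (by omega)
          omega
        · omega
        · omega

theorem amax_succ (t : List Char) (k : Nat) :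
    amax t (k+1) = max (amax t k) ((dfun t k : Int)) := by
  simp [amax, List.range_succ]

theorem amax_nonneg (t : List Char) (k : Nat) : 0 ≤ amax t k := by
  induction k with
  | zero => simp [amax]
  | succ k ih => rw [amax_succ]; exact le_max_of_le_left ih

theorem dpvec_getD (t : List Char) (k j : Nat) (hj : j < t.length + 1) :
    (dpvec t k).getD j 0 = if 1 ≤ j ∧ j ≤ k then ((dfun t (j-1) : Int)) else 0 := by
  simp [dpvec, List.getD, hj]

theorem dpvec_zero (t : List Char) : dpvec t 0 = List.replicate (t.length + 1) 0 := by
  apply List.ext_getElem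
  · simp [dpvec]
  · intro j h1 h2
    simp [dpvec] at h1 ⊢
    omega

theorem dpvec_set (t : List Char) (k : Nat) (_hk : k < t.length) :
    (dpvec t k).set (k+1) ((dfun t k : Int)) = dpvec t (k+1) := by
  apply List.ext_getElem
  · simp [dpvec]
  · intro j h1 h2
    rw [List.getElem_set]
    simp only [dpvec, List.getElem_map, List.getElem_range]
    by_cases hj : k + 1 = j
    · subst hj; simp
    · rw [if_neg hj]
      have heq : (1 ≤ j ∧ j ≤ k) = (1 ≤ j ∧ j ≤ k + 1) := by
        apply propext; constructor <;> intro <;> omega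
      simp only [heq]

theorem dpvec_stable (t : List Char) (k : Nat) (h0 : dfun t k = 0) :
    dpvec t (k+1) = dpvec t k := by
  apply List.ext_getElem
  · simp [dpvec]
  · intro j h1 h2
    simp only [dpvec, List.getElem_map, List.getElem_range]
    by_cases hj : j = k + 1
    · subst hj; simp [h0]
    · have heq : (1 ≤ j ∧ j ≤ k + 1) = (1 ≤ j ∧ j ≤ k) := by
        apply propext; constructor <;> intro <;> omega
      simp only [heq]

theorem lookup_eq (c o : Char) (h : matchO c = some o) :
    (['(', '{', '['][(List.idxOf? c [')', '}', ']']).getD 0]?.getD '*') = o := by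
  rcases matchO_cases c o h with ⟨rfl, rfl⟩ | ⟨rfl, rfl⟩ | ⟨rfl, rfl⟩ <;> decide

theorem matchO_some_disj (c o : Char) (h : matchO c = some o) :
    (c = ')' ∨ c = '}' ∨ c = ']') := by
  rcases matchO_cases c o h with ⟨rfl, rfl⟩ | ⟨rfl, rfl⟩ | ⟨rfl, rfl⟩ <;> tauto

theorem matchO_o_none (c o : Char) (h : matchO c = some o) : matchO o = none := by
  rcases matchO_cases c o h with ⟨rfl, rfl⟩ | ⟨rfl, rfl⟩ | ⟨rfl, rfl⟩ <;> decide

theorem disj_matchO_ne (c : Char) (h : c = ')' ∨ c = '}' ∨ c = ']') : matchO c ≠ none := by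
  rcases h with rfl | rfl | rfl <;> decide

theorem stepA_step (t : List Char) (k : Nat) (hk : k < t.length) :
    stepA ('*' :: t) (dpvec t k, amax t k) (((k+1 : Nat) : Int)) = (dpvec t (k+1), amax t (k+1)) := by
  simp only [stepA]
  cases k with
  | zero =>
    have e1 : ((0+1:ℕ):ℤ) - 1 = ((0:ℕ):ℤ) := by norm_num
    rw [e1]
    simp only [PySem.List.pyGetD_natCast, List.getD_cons_succ, List.getD_cons_zero]
    rw [dpvec_getD t 0 0 (by omega)]
    norm_num
    have hfalse : ∀ x : Char, (x = ')' ∨ x = '}' ∨ x = ']') →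
        ¬('*' = ['(', '{', '['][(List.idxOf? x [')', '}', ']']).getD 0]?.getD '*') := by
      rintro x (rfl|rfl|rfl) <;> decide
    constructor
    · rw [if_neg, if_neg]
      · exact (dpvec_stable t 0 (by simp [dfun])).symm
      · rintro ⟨h1, _, h2⟩; exact hfalse _ h1 h2
      · rintro ⟨h1, h2⟩; exact hfalse _ h1 h2
    · rw [if_neg, if_neg]
      · show max (amax t 0) ((dpvec t 0).getD 1 0) = amax t 1
        rw [dpvec_getD t 0 1 (by omega), amax_succ]
        norm_num
        simp [dfun, amax]
      · rintro ⟨h1, _, h2⟩; exact hfalse _ h1 h2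
      · rintro ⟨h1, h2⟩; exact hfalse _ h1 h2
  | succ j =>
    have e1 : ((j+1+1:ℕ):ℤ) - 1 = ((j+1:ℕ):ℤ) := by push_cast; ring
    rw [e1]
    simp only [PySem.List.pyGetD_natCast, List.getD_cons_succ]
    rw [dpvec_getD t (j+1) (j+1) (by omega)]
    norm_num
    cases hm : matchO (t[j + 1]?.getD '*') with
    | none =>
      have hnc : ¬(t[j + 1]?.getD '*' = ')' ∨ t[j + 1]?.getD '*' = '}' ∨ t[j + 1]?.getD '*' = ']') :=
        fun h => disj_matchO_ne _ h hm
      have hd0 : dfun t (j+1) = 0 :=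
        dfun_zero_of_matchO_none t (j+1) (by simpa [List.getD_eq_getElem?_getD] using hm)
      rw [if_neg (fun h => hnc h.1), if_neg (fun h => hnc h.1)]
      refine ⟨(dpvec_stable t (j+1) hd0).symm, ?_⟩
      show max (amax t (j+1)) ((dpvec t (j+1)).getD (j+1+1) 0) = amax t (j+1+1)
      rw [dpvec_getD t (j+1) (j+2) (by omega), amax_succ t (j+1), hd0]
      have := amax_nonneg t (j+1)
      simp only [Nat.cast_zero]
      rw [if_neg (by omega)]
    | some o =>
      have hdisj := matchO_some_disj _ _ hm
      have hL := lookup_eq _ _ hm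
      rw [hL]
      have hprevle : dfun t j ≤ j + 1 := dfun_le t j
      have hmg : matchO (t.getD (j+1) '*') = some o := by
        simpa [List.getD_eq_getElem?_getD] using hm
      have hsetgoal : ∀ X : Nat, dfun t j ≤ j → t.getD (j - dfun t j) '*' = o →
          (1 ≤ X ∧ X ≤ j + 1 ↔ dfun t j < j) → X - 1 = j - dfun t j - 1 →
          (↑(dfun t j) + 2 + (if 1 ≤ X ∧ X ≤ j + 1 then ((dfun t (X-1) : Int)) else 0)
            = ((dfun t (j+1) : Int))) := by
        intro X hle hch hiff hX1
        have hdk : dfun t (j+1) =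
            dfun t j + 2 + (if dfun t j < j then dfun t (j - dfun t j - 1) else 0) := by
          rw [dfun]; simp only [hmg]; rw [if_pos ⟨hle, hch⟩]
        rw [hdk]
        by_cases hlt : dfun t j < j
        · rw [if_pos (hiff.mpr hlt), if_pos hlt, hX1]; push_cast; ring
        · rw [if_neg (fun h => hlt (hiff.mp h)), if_neg hlt]; push_cast; ring
      split_ifs with hc1 hc2
      · -- A's first branch: s[i-1] is itself the matching open
        have hp0 : dfun t j = 0 := by
          apply dfun_zero_of_matchO_none
          have : t.getD j '*' = o := by simpa [List.getD_eq_getElem?_getD] using hc1.2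
          rw [this]; exact matchO_o_none _ _ hm
        have hch : t.getD (j - dfun t j) '*' = o := by
          rw [hp0, Nat.sub_zero]; simpa [List.getD_eq_getElem?_getD] using hc1.2
        have e2 : ((j:Int) + 1 + 1 - 2 : ℤ) = ((j : Nat) : ℤ) := by ring
        rw [e2, PySem.List.pyGetD_natCast, dpvec_getD t (j+1) j (by omega)]
        have hval := hsetgoal j (by omega) hch (by omega) (by omega)
        rw [hp0] at hval ⊢
        rw [hval]
        have e6 : ((j:Int) + 1 + 1 : ℤ) = (((j+1+1 : Nat)) : ℤ) := by push_cast; ring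
        rw [e6, PySem.List.pySetD_natCast, dpvec_set t (j+1) hk]
        refine ⟨rfl, ?_⟩
        show max (amax t (j+1)) ((dpvec t (j+1+1)).getD (j+1+1) 0) = amax t (j+1+1)
        rw [dpvec_getD t (j+1+1) (j+1+1) (by omega), amax_succ t (j+1)]
        rw [if_pos (by omega)]
        norm_num
      · -- A's second branch: the run dp[i-1] is extended
        obtain ⟨-, hnotopen, h3⟩ := hc2
        have hpj : dfun t j ≤ j := by
          by_contra hgt
          have hpj1 : dfun t j = j + 1 := by omega
          have e3 : ((j:Int) + 1 + 1 - (dfun t j : Int) - 1 : ℤ) = ((0 : Nat) : ℤ) := by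
            rw [hpj1]; push_cast; ring
          rw [e3, PySem.List.pyGetD_natCast, List.getD_cons_zero] at h3
          exact star_ne _ _ hm h3
        have e3 : ((j:Int) + 1 + 1 - (dfun t j : Int) - 1 : ℤ) = (((j + 1 - dfun t j : Nat)) : ℤ) := by
          omega
        have e4 : j + 1 - dfun t j = (j - dfun t j) + 1 := by omega
        rw [e3, PySem.List.pyGetD_natCast, e4, List.getD_cons_succ] at h3
        have e5 : ((j:Int) + 1 + 1 - (dfun t j : Int) - 2 : ℤ) = (((j - dfun t j : Nat)) : ℤ) := by
          omega
        rw [e5, PySem.List.pyGetD_natCast, dpvec_getD t (j+1) (j - dfun t j) (by omega)]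
        have hval := hsetgoal (j - dfun t j) hpj h3 (by omega) (by omega)
        rw [hval]
        have e6 : ((j:Int) + 1 + 1 : ℤ) = (((j+1+1 : Nat)) : ℤ) := by push_cast; ring
        rw [e6, PySem.List.pySetD_natCast, dpvec_set t (j+1) hk]
        refine ⟨rfl, ?_⟩
        show max (amax t (j+1)) ((dpvec t (j+1+1)).getD (j+1+1) 0) = amax t (j+1+1)
        rw [dpvec_getD t (j+1+1) (j+1+1) (by omega), amax_succ t (j+1)]
        rw [if_pos (by omega)]
        norm_num
      · -- neither branch fires: dp[i] stays 0
        have hd0 : dfun t (j+1) = 0 := by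
          rw [dfun]; simp only [hmg]
          rw [if_neg]
          rintro ⟨hle, hch⟩
          by_cases hp0 : dfun t j = 0
          · refine hc1 ⟨hdisj, ?_⟩
            have h := hch; rw [hp0, Nat.sub_zero] at h
            simpa [List.getD_eq_getElem?_getD] using h
          · refine hc2 ⟨hdisj, ?_, ?_⟩
            · have hclose_j : matchO (t.getD j '*') ≠ none := by
                intro hnone; exact hp0 (dfun_zero_of_matchO_none t j hnone)
              refine ⟨?_, ?_, ?_⟩ <;> intro h <;>
                · rw [show (t.getD j '*') = t[j]?.getD '*' from rfl, h] at hclose_j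
                  exact hclose_j (by decide)
            · have e3 : ((j:Int) + 1 + 1 - (dfun t j : Int) - 1 : ℤ) =
                  (((j + 1 - dfun t j : Nat)) : ℤ) := by omega
              have e4 : j + 1 - dfun t j = (j - dfun t j) + 1 := by omega
              rw [e3, PySem.List.pyGetD_natCast, e4, List.getD_cons_succ]
              exact hch
        refine ⟨(dpvec_stable t (j+1) hd0).symm, ?_⟩
        show max (amax t (j+1)) ((dpvec t (j+1)).getD (j+1+1) 0) = amax t (j+1+1)
        rw [dpvec_getD t (j+1) (j+2) (by omega), amax_succ t (j+1), hd0]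
        have := amax_nonneg t (j+1)
        simp only [Nat.cast_zero]
        rw [if_neg (by omega)]

theorem A_loop (t : List Char) : ∀ k, k ≤ t.length →
    (PySem.List.pyRange 1 ((k : Int)+1) 1).foldl (stepA ('*' :: t))
      (List.replicate (t.length + 1) 0, 0) = (dpvec t k, amax t k) := by
  intro k
  induction k with
  | zero => intro _; rw [PySem.List.pyRange_one_eq_nil (by norm_num)]; simp [dpvec_zero, amax]
  | succ k ih =>
    intro hk
    have h1 : ((k+1 : Nat) : Int) + 1 = ((k : Int) + 1) + 1 := by push_cast; ring
    rw [h1, PySem.List.pyRange_one_succ_right (by omega), List.foldl_append]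
    rw [ih (by omega)]
    simp only [List.foldl_cons, List.foldl_nil]
    have h2 : (k : Int) + 1 = ((k+1 : Nat) : Int) := by push_cast; ring
    rw [h2, stepA_step t k (by omega)]

theorem A_eq (s : String) : LBSlength s = amax s.toList s.toList.length := by
  show ((PySem.List.pyRange 1 (PySem.List.len ('*' :: s.toList)) 1).foldl (stepA ('*' :: s.toList))
      (List.replicate ('*' :: s.toList).length 0, 0)).2 = amax s.toList s.toList.length
  have hlen : PySem.List.len ('*' :: s.toList) = (s.toList.length : Int) + 1 := by
    simp [PySem.List.len_eq]
  rw [hlen]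
  have h := A_loop s.toList s.toList.length le_rfl
  simp only [List.length_cons] at h ⊢
  rw [h]

theorem B_loop (t : List Char) : ∀ (u : List Char) (k : Nat) (stack : List Int) (mx : Int),
    t.drop k = u → ChainOK t stack → stack.headD 0 < (k : Int) →
    dInt t ((k : Int) - 1) = ((k : Int) - 1) - stack.headD 0 → mx = amax t k →
    ((PySem.List.enumerate u (k : Int)).foldl (stepB t) (stack, mx)).2 = amax t (k + u.length) := by
  intro u
  induction u with
  | nil =>
    intro k stack mx _ _ _ _ hmx
    simpa [PySem.List.enumerate] using hmx
  | cons c u' ih =>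
    intro k stack mx hdrop hchain hhead hdint hmx
    have hget : t[k]? = some c := by
      have h0 : (t.drop k)[0]? = t[k]? := by simp [List.getElem?_drop]
      rw [hdrop] at h0
      simpa using h0.symm
    obtain ⟨hklen, -⟩ := List.getElem?_eq_some_iff.mp hget
    have hgc : t.getD k '*' = c := by simp [List.getD_eq_getElem?_getD, hget]
    have hdrop' : t.drop (k+1) = u' := by rw [← List.drop_drop, hdrop]; rfl
    obtain ⟨a, rest, rfl⟩ : ∃ a rest, stack = a :: rest := by
      cases stack with
      | nil => exact absurd hchain (by simp [ChainOK])
      | cons a rest => exact ⟨a, rest, rfl⟩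
    simp only [List.headD_cons] at hhead hdint
    rw [PySem.List.enumerate_cons, List.foldl_cons]
    have hcast : (k:Int) + 1 = ((k+1 : Nat) : Int) := by push_cast; ring
    have hlen : k + (c :: u').length = (k+1) + u'.length := by simp; omega
    rw [hlen]
    -- the three invariant obligations for a step that pushes index k (dfun t k = 0 there)
    have hpush : ∀ mx', dfun t k = 0 → mx' = amax t k →
        ((PySem.List.enumerate u' ((k:Int) + 1)).foldl (stepB t)
          (((k:Int) :: a :: rest), mx')).2 = amax t ((k+1) + u'.length) := by
      intro mx' hd0 hmx'
      rw [hcast]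
      apply ih (k+1) ((k:Int) :: a :: rest) mx' hdrop'
      · show a < (k:Int) ∧ 0 ≤ (k:Int) ∧ dInt t ((k:Int) - 1) = (k:Int) - 1 - a ∧
          ChainOK t (a :: rest)
        exact ⟨hhead, by positivity, hdint, hchain⟩
      · show ((k:Int) : Int) < ((k+1 : Nat) : Int)
        push_cast; omega
      · have e : ((k+1 : Nat) : Int) - 1 = ((k:Nat) : Int) := by push_cast; ring
        rw [e]
        simp [dInt, hd0]
      · rw [hmx', amax_succ t k, hd0]
        simp only [Nat.cast_zero]
        exact (max_eq_left (amax_nonneg t k)).symm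
    by_cases hop : (['(', '{', '['].contains c) = true
    · -- push an opening bracket
      have hstep : stepB t ((a :: rest), mx) ((k:Int), c) = (((k:Int) :: a :: rest), mx) := by
        simp only [stepB]
        rw [if_pos hop]
      rw [hstep]
      exact hpush mx (dfun_zero_of_matchO_none t k (by rw [hgc]; exact contains_open_matchO c hop))
        hmx
    · -- c is not an opening bracket
      cases hm : matchO c with
      | none =>
        -- junk character (or unmatchable): push a barrier
        have hstep : stepB t ((a :: rest), mx) ((k:Int), c) = (((k:Int) :: a :: rest), mx) := by
          simp only [stepB]
          rw [if_neg (by simpa using hop), if_neg]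
          rintro ⟨-, hc2⟩
          rw [List.headD_cons, get?_pairs, hm] at hc2
          simp at hc2
        rw [hstep]
        exact hpush mx (dfun_zero_of_matchO_none t k (by rw [hgc]; exact hm)) hmx
      | some o =>
        by_cases ha : a = (-1 : Int)
        · -- the stack is just the sentinel: whole prefix is balanced, no match possible
          have hd0 : dfun t k = 0 := by
            cases k with
            | zero => simp [dfun]
            | succ j =>
              have hj : (dfun t j : Int) = (j : Int) + 1 := by
                have e : ((j+1 : Nat) : Int) - 1 = ((j:Nat) : Int) := by push_cast; ring
                rw [e] at hdint
                simp [dInt] at hdint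
                omega
              rw [dfun]
              have hmg : matchO (t.getD (j+1) '*') = some o := by rw [hgc]; exact hm
              simp only [hmg]
              rw [if_neg]
              rintro ⟨hle, -⟩
              omega
          have hstep : stepB t ((a :: rest), mx) ((k:Int), c) = (((k:Int) :: a :: rest), mx) := by
            simp only [stepB]
            rw [if_neg (by simpa using hop), if_neg]
            rintro ⟨h1, -⟩
            rw [List.headD_cons] at h1
            exact h1 ha
          rw [hstep]
          exact hpush mx hd0 hmx
        · -- a real index a is on top; it is a close-or-barrier position below, t[a] decides
          obtain ⟨b, rest', rfl⟩ : ∃ b rest', rest = b :: rest' := by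
            cases rest with
            | nil => exact absurd hchain (by intro h; exact ha h)
            | cons b rest' => exact ⟨b, rest', rfl⟩
          obtain ⟨hba, ha0, hpair, hchain'⟩ :
              b < a ∧ 0 ≤ a ∧ dInt t (a - 1) = a - 1 - b ∧ ChainOK t (b :: rest') := hchain
          obtain ⟨j, rfl⟩ : ∃ j, k = j + 1 := ⟨k - 1, by omega⟩
          have ej : ((j+1 : Nat) : Int) - 1 = ((j:Nat) : Int) := by push_cast; ring
          rw [ej] at hdint
          have hprevj : (dfun t j : Int) = (j : Int) - a := by
            simp [dInt] at hdint
            omega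
          have hprevle : dfun t j ≤ j := by omega
          have hatoNat : a.toNat = j - dfun t j := by omega
          have hmg : matchO (t.getD (j+1) '*') = some o := by rw [hgc]; exact hm
          have haj : a.toNat < t.length := by omega
          have hpy : PySem.List.pyGetD t a '*' = t.getD a.toNat '*' := by
            rw [PySem.List.pyGetD_of_nonneg t '*' ha0]
          by_cases hmatch : t.getD (j - dfun t j) '*' = o
          · -- matching open on top: pop, measure against the new top
            have hdfv : dfun t (j+1) =
                dfun t j + 2 + (if dfun t j < j then dfun t (j - dfun t j - 1) else 0) := by
              rw [dfun]; simp only [hmg]; rw [if_pos ⟨hprevle, hmatch⟩]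
            have hinner : ((if dfun t j < j then dfun t (j - dfun t j - 1) else 0 : Nat) : Int)
                = a - 1 - b := by
              by_cases hA : 1 ≤ a
              · rw [if_pos (by omega)]
                have e1 : (0:Int) ≤ a - 1 := by omega
                simp only [dInt, if_neg (by omega : ¬ (a - 1 : Int) < 0)] at hpair
                have e2 : (a - 1).toNat = j - dfun t j - 1 := by omega
                rw [e2] at hpair
                exact hpair
              · have ha0' : a = 0 := by omega
                rw [if_neg (by omega)]
                subst ha0'
                simp [dInt] at hpair
                omega
            have hdk : ((dfun t (j+1) : Nat) : Int) = ((j+1 : Nat) : Int) - b := by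
              have : ((dfun t (j+1) : Nat) : Int) = ((dfun t j : Nat) : Int) + 2 +
                  ((if dfun t j < j then dfun t (j - dfun t j - 1) else 0 : Nat) : Int) := by
                rw [hdfv]; push_cast; ring
              rw [this, hinner]
              push_cast
              omega
            have hstep : stepB t ((a :: b :: rest'), mx) (((j+1 : Nat) : Int), c) =
                ((b :: rest'), max mx (((j+1 : Nat) : Int) - b)) := by
              simp only [stepB]
              rw [if_neg (by simpa using hop), if_pos]
              · rw [List.tail_cons, List.headD_cons]
              · refine ⟨by rw [List.headD_cons]; exact ha, ?_⟩
                rw [List.headD_cons, get?_pairs, hm, hpy, hatoNat, hmatch]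
            rw [hstep, hcast]
            apply ih (j+1+1) (b :: rest') _ hdrop' hchain'
            · show b < ((j+1+1 : Nat) : Int)
              push_cast at hhead ⊢; omega
            · have e : ((j+1+1 : Nat) : Int) - 1 = (((j+1:Nat)) : Int) := by push_cast; ring
              rw [e]
              simp only [List.headD_cons]
              have hdi : dInt t (((j+1:Nat)) : Int) = ((dfun t (j+1) : Nat) : Int) := by
                simp only [dInt]; rw [if_neg (by omega)]; norm_num
              rw [hdi, hdk]
            · rw [hmx, amax_succ t (j+1)]
              rw [hdk]
          · -- top does not match: push a barrier
            have hd0 : dfun t (j+1) = 0 := by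
              rw [dfun]; simp only [hmg]
              rw [if_neg]
              rintro ⟨-, hch⟩
              exact hmatch hch
            have hstep : stepB t ((a :: b :: rest'), mx) (((j+1 : Nat) : Int), c) =
                ((((j+1 : Nat) : Int) :: a :: b :: rest'), mx) := by
              simp only [stepB]
              rw [if_neg (by simpa using hop), if_neg]
              rintro ⟨-, hc2⟩
              rw [List.headD_cons, get?_pairs, hm, hpy, hatoNat] at hc2
              exact hmatch (Option.some.inj hc2).symm
            rw [hstep]
            exact hpush mx hd0 hmx

theorem B_eq (s : String) : LBSlength_alt s = amax s.toList s.toList.length := by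
  unfold LBSlength_alt
  have h := B_loop s.toList s.toList 0 [-1] 0 (by simp)
    (by simp [ChainOK]) (by norm_num) (by simp [dInt]) (by simp [amax])
  simpa using h

-- ===== VERDICT (by name: the statement is the Claim_ definition above) =====
theorem LBSlength_spec : Claim_equal_LBSlength := by
  intro s _
  show LBSlength s = LBSlength_alt s
  rw [A_eq, B_eq]
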